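-- pv_equiv track=rewrite | github.com/dvsolutionshn/dvsolutions-erp | core/access.py | permiso_rrhh_desde_ruta
-- ===== SOURCE A (Python) =====
-- RRHH_PERMISSION_MAP = [
--     ("configuracion/", "puede_configuracion_rrhh"),
--     ("empleados/", "puede_empleados"),
--     ("planillas/", "puede_planillas"),
--     ("movimientos/", "puede_planillas"),
--     ("vacaciones/", "puede_vacaciones"),
--     ("voucher/", "puede_planillas"),
-- ]
--
-- def permiso_rrhh_desde_ruta(path_suffix):
--     if not path_suffix:
--         return None
--     normalized = path_suffix if path_suffix.endswith("/") else f"{path_suffix}/"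
--     if normalized.startswith(tuple(str(i) for i in range(10))):
--         return "puede_rrhh"
--     for prefix, permiso in RRHH_PERMISSION_MAP:
--         if normalized.startswith(prefix):
--             return permiso
--     return None
-- ===== SOURCE B (Python) =====
-- def _trie_insert(trie, prefix, permiso):
--     """Return a new trie (nested dicts, str = accept) with `prefix` -> `permiso` added."""
--     ch = prefix[0]
--     if len(prefix) == 1:
--         return {**trie, ch: permiso}
--     child = trie.get(ch)
--     if not isinstance(child, dict):
--         child = {}
--     return {**trie, ch: _trie_insert(child, prefix[1:], permiso)}
--
--
-- _RRHH_ENTRIES = [(d, "puede_rrhh") for d in "0123456789"] + [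
--     ("configuracion/", "puede_configuracion_rrhh"),
--     ("empleados/", "puede_empleados"),
--     ("planillas/", "puede_planillas"),
--     ("movimientos/", "puede_planillas"),
--     ("vacaciones/", "puede_vacaciones"),
--     ("voucher/", "puede_planillas"),
-- ]
--
-- _RRHH_TRIE = {}
-- for _prefix, _permiso in _RRHH_ENTRIES:
--     _RRHH_TRIE = _trie_insert(_RRHH_TRIE, _prefix, _permiso)
--
--
-- def permiso_rrhh_desde_ruta(path_suffix):
--     if not path_suffix:
--         return None
--     node = _RRHH_TRIE
--     for ch in path_suffix:
--         node = node.get(ch)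
--         if node is None:
--             return None
--         if isinstance(node, str):
--             return node
--     # the path ended inside the trie; account for the implicit trailing slash
--     if not path_suffix.endswith("/"):
--         node = node.get("/")
--         if isinstance(node, str):
--             return node
--     return None
-- ===== Notes on version B (the rewrite author's own statement) =====
-- stated objective: alternative
-- what changed: replaces A's normalization plus per-prefix startswith scan (and the ten-string digit tuple) by a character trie built once from all sixteen accepting prefixes, walked character by character with one extra slash-edge step for the implicit trailing slash
import Mathlib
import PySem

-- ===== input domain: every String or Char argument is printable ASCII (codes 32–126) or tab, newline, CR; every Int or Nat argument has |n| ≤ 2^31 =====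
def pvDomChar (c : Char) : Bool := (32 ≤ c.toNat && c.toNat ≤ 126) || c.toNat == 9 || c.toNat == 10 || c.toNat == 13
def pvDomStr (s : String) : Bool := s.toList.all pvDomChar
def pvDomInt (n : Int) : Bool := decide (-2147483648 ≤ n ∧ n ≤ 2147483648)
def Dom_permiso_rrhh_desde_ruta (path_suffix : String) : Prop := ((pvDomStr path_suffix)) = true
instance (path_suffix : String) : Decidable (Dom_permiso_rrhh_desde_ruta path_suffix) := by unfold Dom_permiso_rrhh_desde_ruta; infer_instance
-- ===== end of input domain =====

-- B replaces A's per-prefix startswith scan (and ten-string digit tuple) by one character-trie walk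
-- over a trie built once from all sixteen accepting prefixes (alternative algorithm; same cost class).

-- ===== PORT A =====
def RRHH_PERMISSION_MAP : List (String × String) :=
  [("configuracion/", "puede_configuracion_rrhh"),
   ("empleados/", "puede_empleados"),
   ("planillas/", "puede_planillas"),
   ("movimientos/", "puede_planillas"),
   ("vacaciones/", "puede_vacaciones"),
   ("voucher/", "puede_planillas")]

-- 'for prefix, permiso in RRHH_PERMISSION_MAP: if normalized.startswith(prefix): return permiso'
def rrhhScan : List (String × String) → List Char → Option String
  | [], _ => none
  | (pre, permiso) :: rest, n =>
      if PySem.Chars.startswith n pre.toList then some permiso else rrhhScan rest n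

def permiso_rrhh_desde_ruta (path_suffix : String) : Option String :=
  if path_suffix = "" then none
  else
    -- normalized = path_suffix if path_suffix.endswith("/") else f"{path_suffix}/"  (as char list)
    let cs := path_suffix.toList
    let normalized := if PySem.Chars.endswith cs ['/'] then cs else cs ++ ['/']
    -- normalized.startswith(tuple(str(i) for i in range(10)))
    if ((PySem.List.pyRange 0 10 1).map PySem.Int.toStr).any
        (fun d => PySem.Chars.startswith normalized d.toList) then some "puede_rrhh"
    else rrhhScan RRHH_PERMISSION_MAP normalized

-- ===== PORT B =====
-- the nested-dict trie of Source B: a value is either a permission (str) or an inner dict;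
-- edges keep Python-dict insertion order ({**trie, ch: x} overwrites in place, appends if new)
mutual
inductive Trie where
  | leaf : String → Trie
  | node : Edges → Trie
inductive Edges where
  | nil : Edges
  | cons : Char → Trie → Edges → Edges
end

-- trie.get(ch)
def edgesGet : Edges → Char → Option Trie
  | .nil, _ => none
  | .cons c t rest, d => if c = d then some t else edgesGet rest d

-- {**trie, ch: t}
def edgesSet : Edges → Char → Trie → Edges
  | .nil, c, t => .cons c t .nil
  | .cons c' t' rest, c, t =>
      if c' = c then .cons c' t rest else .cons c' t' (edgesSet rest c t)

-- _trie_insert(trie, prefix, permiso) of Source B (pure, recursive on the prefix)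
def trieInsert : Edges → List Char → String → Edges
  | tr, [], _ => tr          -- unreachable: every prefix in the entry table is nonempty
  | tr, [c], permiso => edgesSet tr c (.leaf permiso)
  | tr, c :: rest, permiso =>
      let child := match edgesGet tr c with
        | some (.node e) => e
        | _ => Edges.nil
      edgesSet tr c (.node (trieInsert child rest permiso))

def RRHH_ENTRIES : List (String × String) :=
  (["0","1","2","3","4","5","6","7","8","9"].map (fun d => (d, "puede_rrhh"))) ++
  [("configuracion/", "puede_configuracion_rrhh"),
   ("empleados/", "puede_empleados"),
   ("planillas/", "puede_planillas"),
   ("movimientos/", "puede_planillas"),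
   ("vacaciones/", "puede_vacaciones"),
   ("voucher/", "puede_planillas")]

def rrhhTrie : Edges :=
  RRHH_ENTRIES.foldl (fun t pv => trieInsert t pv.1.toList pv.2) .nil

-- the 'for ch in path_suffix' loop: .inl = returned inside the loop, .inr = loop finished at a node
def walkLoop : Edges → List Char → Option String ⊕ Edges
  | e, [] => .inr e
  | e, c :: rest =>
      match edgesGet e c with
      | none => .inl none
      | some (.leaf s) => .inl (some s)
      | some (.node e') => walkLoop e' rest

def permiso_rrhh_desde_ruta_alt (path_suffix : String) : Option String :=
  if path_suffix = "" then none
  else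
    match walkLoop rrhhTrie path_suffix.toList with
    | .inl r => r
    | .inr e =>
        if PySem.Chars.endswith path_suffix.toList ['/'] then none
        else
          match edgesGet e '/' with
          | some (.leaf s) => some s
          | _ => none

-- ===== PRECONDITION & SPEC =====
def Spec_permiso_rrhh_desde_ruta (path_suffix : String) (out : Option String) : Prop := out = permiso_rrhh_desde_ruta_alt path_suffix
instance (path_suffix : String) (out : Option String) : Decidable (Spec_permiso_rrhh_desde_ruta path_suffix out) := by unfold Spec_permiso_rrhh_desde_ruta; infer_instance

-- ===== CLAIM (what is proved, stated in full; the proofs are below) =====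
def Claim_equal_permiso_rrhh_desde_ruta : Prop := ∀ (path_suffix : String), Dom_permiso_rrhh_desde_ruta path_suffix → Spec_permiso_rrhh_desde_ruta path_suffix (permiso_rrhh_desde_ruta path_suffix)

-- ===== LEMMAS AND PROOFS =====

-- a single-entry chain: chain s v accepts exactly the strings with prefix s
def chain : List Char → String → Trie
  | [], v => .leaf v
  | c :: s, v => .node (.cons c (chain s v) .nil)

-- continue the walk after following an edge to trie t
def resume : Trie → List Char → Option String ⊕ Edges
  | .leaf s, _ => .inl (some s)
  | .node e, l => walkLoop e l

def walkNormRes : Option String ⊕ Edges → Option String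
  | .inl r => r
  | .inr _ => none

theorem walkLoop_cons (e : Edges) (c : Char) (l : List Char) :
    walkLoop e (c :: l) = match edgesGet e c with
      | none => .inl none
      | some t => resume t l := by
  cases h : edgesGet e c with
  | none => simp [walkLoop, h]
  | some t => cases t <;> simp [walkLoop, resume, h]

theorem walkLoop_append (e : Edges) (l m : List Char) :
    walkLoop e (l ++ m) = match walkLoop e l with
      | .inl r => .inl r
      | .inr e' => walkLoop e' m := by
  induction l generalizing e with
  | nil => simp [walkLoop]
  | cons c rest ih =>
    cases h : edgesGet e c with
    | none => simp [walkLoop, h]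
    | some t => cases t <;> simp [walkLoop, h, ih]

theorem chain_walk (s : List Char) (v : String) (n : List Char) :
    walkNormRes (resume (chain s v) n) = if List.isPrefixOf s n then some v else none := by
  induction s generalizing n with
  | nil => simp [chain, resume, walkNormRes, List.isPrefixOf]
  | cons c s' ih =>
    cases n with
    | nil => simp [chain, resume, walkLoop, walkNormRes, List.isPrefixOf]
    | cons d n' =>
      by_cases hcd : c = d
      · subst hcd
        have hr : resume (chain (c :: s') v) (c :: n') = resume (chain s' v) n' := by
          show walkLoop (Edges.cons c (chain s' v) .nil) (c :: n') = resume (chain s' v) n'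
          rw [walkLoop_cons]; simp [edgesGet]
        rw [hr, ih]
        simp [List.isPrefixOf]
      · simp [chain, resume, walkLoop_cons, edgesGet, hcd, List.isPrefixOf, walkNormRes]

theorem rrhhTrie_eq : rrhhTrie =
    .cons '0' (.leaf "puede_rrhh") (.cons '1' (.leaf "puede_rrhh") (.cons '2' (.leaf "puede_rrhh")
    (.cons '3' (.leaf "puede_rrhh") (.cons '4' (.leaf "puede_rrhh") (.cons '5' (.leaf "puede_rrhh")
    (.cons '6' (.leaf "puede_rrhh") (.cons '7' (.leaf "puede_rrhh") (.cons '8' (.leaf "puede_rrhh")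
    (.cons '9' (.leaf "puede_rrhh")
    (.cons 'c' (chain "onfiguracion/".toList "puede_configuracion_rrhh")
    (.cons 'e' (chain "mpleados/".toList "puede_empleados")
    (.cons 'p' (chain "lanillas/".toList "puede_planillas")
    (.cons 'm' (chain "ovimientos/".toList "puede_planillas")
    (.cons 'v' (.node (.cons 'a' (chain "caciones/".toList "puede_vacaciones")
                      (.cons 'o' (chain "ucher/".toList "puede_planillas") .nil)))
    .nil)))))))))))))) := by
  rfl

-- PySem.Chars.startswith as List.isPrefixOf, for structural reduction
theorem sw_eq (n p : List Char) : PySem.Chars.startswith n p = List.isPrefixOf p n := by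
  rw [Bool.eq_iff_iff, PySem.Chars.startswith_iff, List.isPrefixOf_iff_prefix]

theorem main_walk (n : List Char) :
    walkNormRes (walkLoop rrhhTrie n) =
      if ((PySem.List.pyRange 0 10 1).map PySem.Int.toStr).any
          (fun d => PySem.Chars.startswith n d.toList) then some "puede_rrhh"
      else rrhhScan RRHH_PERMISSION_MAP n := by
  have hlit : (PySem.List.pyRange 0 10 1).map PySem.Int.toStr =
      ["0", "1", "2", "3", "4", "5", "6", "7", "8", "9"] := by decide
  rw [rrhhTrie_eq, hlit]
  simp only [List.any_cons, List.any_nil, Bool.or_false, sw_eq]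
  cases n with
  | nil => simp [walkLoop, walkNormRes, rrhhScan, RRHH_PERMISSION_MAP, sw_eq, List.isPrefixOf]
  | cons c rest =>
    by_cases h0 : c = '0'
    · subst h0; simp [walkLoop, edgesGet, walkNormRes, List.isPrefixOf]
    by_cases h1 : c = '1'
    · subst h1; simp [walkLoop, edgesGet, walkNormRes, List.isPrefixOf]
    by_cases h2 : c = '2'
    · subst h2; simp [walkLoop, edgesGet, walkNormRes, List.isPrefixOf]
    by_cases h3 : c = '3'
    · subst h3; simp [walkLoop, edgesGet, walkNormRes, List.isPrefixOf]
    by_cases h4 : c = '4'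
    · subst h4; simp [walkLoop, edgesGet, walkNormRes, List.isPrefixOf]
    by_cases h5 : c = '5'
    · subst h5; simp [walkLoop, edgesGet, walkNormRes, List.isPrefixOf]
    by_cases h6 : c = '6'
    · subst h6; simp [walkLoop, edgesGet, walkNormRes, List.isPrefixOf]
    by_cases h7 : c = '7'
    · subst h7; simp [walkLoop, edgesGet, walkNormRes, List.isPrefixOf]
    by_cases h8 : c = '8'
    · subst h8; simp [walkLoop, edgesGet, walkNormRes, List.isPrefixOf]
    by_cases h9 : c = '9'
    · subst h9; simp [walkLoop, edgesGet, walkNormRes, List.isPrefixOf]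
    by_cases hc : c = 'c'
    · subst hc
      simp [walkLoop_cons, edgesGet, chain_walk, rrhhScan, RRHH_PERMISSION_MAP, sw_eq,
        List.isPrefixOf]
    by_cases he : c = 'e'
    · subst he
      simp [walkLoop_cons, edgesGet, chain_walk, rrhhScan, RRHH_PERMISSION_MAP, sw_eq,
        List.isPrefixOf]
    by_cases hp : c = 'p'
    · subst hp
      simp [walkLoop_cons, edgesGet, chain_walk, rrhhScan, RRHH_PERMISSION_MAP, sw_eq,
        List.isPrefixOf]
    by_cases hm : c = 'm'
    · subst hm
      simp [walkLoop_cons, edgesGet, chain_walk, rrhhScan, RRHH_PERMISSION_MAP, sw_eq,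
        List.isPrefixOf]
    by_cases hv : c = 'v'
    · subst hv
      simp only [walkLoop_cons, edgesGet]
      simp only [show ¬(('0':Char) = 'v') from by decide, show ¬(('1':Char) = 'v') from by decide,
        show ¬(('2':Char) = 'v') from by decide, show ¬(('3':Char) = 'v') from by decide,
        show ¬(('4':Char) = 'v') from by decide, show ¬(('5':Char) = 'v') from by decide,
        show ¬(('6':Char) = 'v') from by decide, show ¬(('7':Char) = 'v') from by decide,
        show ¬(('8':Char) = 'v') from by decide, show ¬(('9':Char) = 'v') from by decide,
        show ¬(('c':Char) = 'v') from by decide, show ¬(('e':Char) = 'v') from by decide,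
        show ¬(('p':Char) = 'v') from by decide, show ¬(('m':Char) = 'v') from by decide,
        if_neg, if_pos, ite_false, ite_true]
      cases rest with
      | nil => simp [resume, walkLoop, walkNormRes, rrhhScan, RRHH_PERMISSION_MAP, sw_eq,
          List.isPrefixOf]
      | cons d rest' =>
        by_cases ha : d = 'a'
        · subst ha
          have hr : resume (Trie.node (.cons 'a' (chain "caciones/".toList "puede_vacaciones")
              (.cons 'o' (chain "ucher/".toList "puede_planillas") .nil))) ('a' :: rest') =
              resume (chain "caciones/".toList "puede_vacaciones") rest' := by
            show walkLoop _ _ = _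
            rw [walkLoop_cons]; simp [edgesGet]
          rw [hr, chain_walk]
          simp [rrhhScan, RRHH_PERMISSION_MAP, sw_eq, List.isPrefixOf]
        by_cases ho : d = 'o'
        · subst ho
          have hr : resume (Trie.node (.cons 'a' (chain "caciones/".toList "puede_vacaciones")
              (.cons 'o' (chain "ucher/".toList "puede_planillas") .nil))) ('o' :: rest') =
              resume (chain "ucher/".toList "puede_planillas") rest' := by
            show walkLoop _ _ = _
            rw [walkLoop_cons]; simp [edgesGet]
          rw [hr, chain_walk]
          simp [rrhhScan, RRHH_PERMISSION_MAP, sw_eq, List.isPrefixOf]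
        · have hr : resume (Trie.node (.cons 'a' (chain "caciones/".toList "puede_vacaciones")
              (.cons 'o' (chain "ucher/".toList "puede_planillas") .nil))) (d :: rest') =
              Sum.inl none := by
            show walkLoop _ _ = _
            rw [walkLoop_cons]; simp [edgesGet, Ne.symm ha, Ne.symm ho]
          rw [hr]
          simp [walkNormRes, rrhhScan, RRHH_PERMISSION_MAP, sw_eq, List.isPrefixOf,
            Ne.symm ha, Ne.symm ho]
    · simp [walkLoop, edgesGet, walkNormRes, rrhhScan, RRHH_PERMISSION_MAP, sw_eq,
        List.isPrefixOf, Ne.symm h0, Ne.symm h1, Ne.symm h2, Ne.symm h3, Ne.symm h4,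
        Ne.symm h5, Ne.symm h6, Ne.symm h7, Ne.symm h8, Ne.symm h9, Ne.symm hc,
        Ne.symm he, Ne.symm hp, Ne.symm hm, Ne.symm hv]

-- ===== VERDICT (by name: the statement is the Claim_ definition above) =====
theorem permiso_rrhh_desde_ruta_spec : Claim_equal_permiso_rrhh_desde_ruta := by
  intro p _
  show permiso_rrhh_desde_ruta p = permiso_rrhh_desde_ruta_alt p
  unfold permiso_rrhh_desde_ruta permiso_rrhh_desde_ruta_alt
  by_cases hp : p = ""
  · simp [hp]
  · simp only [if_neg hp]
    by_cases he : PySem.Chars.endswith p.toList ['/']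
    · rw [if_pos he, ← main_walk]
      cases h : walkLoop rrhhTrie p.toList with
      | inl r => simp [walkNormRes]
      | inr e => simp [walkNormRes, he]
    · rw [if_neg he, ← main_walk, walkLoop_append]
      cases h : walkLoop rrhhTrie p.toList with
      | inl r => simp [walkNormRes]
      | inr e =>
        simp only [walkNormRes, if_neg he]
        cases hg : edgesGet e '/' with
        | none => simp [walkLoop, hg]
        | some t => cases t <;> simp [walkLoop, hg]
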